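-- pv_equiv track=rewrite | github.com/FyDob/BSc-Thesis | src/corpus_tools.py | maxBracketDistance
-- ===== SOURCE A (Python) =====
-- def maxBracketDistance(word):
-- 	'''returns maximum distance in characters between an opening and its corresponding closing bracket, i.e. maxBracketDistance('[{[]}]') is 4.
-- 		args:
-- 			word: string, Dyck word consisting of [, {, }, ] as brackets.
-- 		returns:
-- 			max(max_distance_square,max_distance_curly): int, maximum distance for either of the two bracket pair types = maximum distance in the word.'''
-- 	# Remove EOW symbol when working with processed corpus.
-- 	if word[-1] == '$':
-- 		word = word[:-1]
-- 	distance_square = 0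
-- 	max_distance_square = 0
-- 	distance_curly = 0
-- 	max_distance_curly = 0
-- 	square_stack = []
-- 	curly_stack = []
--
-- 	# Counts 'seen' characters between two corresponding brackets
-- 	for character in word:
-- 		# Fill/empty the two stacks to keep count of unclosed brackets
-- 		if character == "[":
-- 			square_stack.append(character)
-- 		elif character == "{":
-- 			curly_stack.append(character)
-- 		elif character == "]":
-- 			square_stack.pop()
-- 		else:
-- 			curly_stack.pop()
--
-- 		 # Check if stack is empty - means all opening brackets have been closed
-- 		if not square_stack:
-- 			# Save new max_distance_square and reset 'seen' characters counter
-- 			if distance_square > max_distance_square: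
-- 				max_distance_square = distance_square - 1 # Adjust for first character being counted
-- 			distance_square = 0
-- 		else: # Increment 'seen' characters counter as long as there is still an unclosed bracket on the stack
-- 			distance_square += 1
--
-- 		# Same process as for square_stack
-- 		if not curly_stack:
-- 			if distance_curly > max_distance_curly:
-- 				max_distance_curly = distance_curly - 1
-- 			distance_curly = 0
-- 		else:
-- 			distance_curly += 1
--
-- 	return max(max_distance_square, max_distance_curly)
-- ===== SOURCE B (Python) =====
-- def maxBracketDistance(word):
-- 	'''returns maximum distance in characters between an opening and its corresponding closing bracket.'''
-- 	# Remove EOW symbol when working with processed corpus.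
-- 	if word[-1] == '$':
-- 		word = word[:-1]
-- 	best = 0
-- 	square_stack = []
-- 	curly_stack = []
-- 	for i, character in enumerate(word):
-- 		if character == "[":
-- 			square_stack.append(i)
-- 		elif character == "{":
-- 			curly_stack.append(i)
-- 		elif character == "]":
-- 			j = square_stack.pop()
-- 			if not square_stack:  # outermost pair of its type; inner pairs are dominated
-- 				best = max(best, i - j - 1)
-- 		else:
-- 			j = curly_stack.pop()
-- 			if not curly_stack:
-- 				best = max(best, i - j - 1)
-- 	return best
-- ===== Notes on version B (the rewrite author's own statement) =====
-- stated objective: simpler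
-- what changed: Stacks hold the index of each opening bracket (enumerate); when a pop empties its stack the pair distance i - j - 1 is folded into a single best accumulator, replacing A's two running 'seen'-character counters with their per-iteration increment, reset-on-empty and minus-one bookkeeping and the final max of two per-type maxima.
import Mathlib
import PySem

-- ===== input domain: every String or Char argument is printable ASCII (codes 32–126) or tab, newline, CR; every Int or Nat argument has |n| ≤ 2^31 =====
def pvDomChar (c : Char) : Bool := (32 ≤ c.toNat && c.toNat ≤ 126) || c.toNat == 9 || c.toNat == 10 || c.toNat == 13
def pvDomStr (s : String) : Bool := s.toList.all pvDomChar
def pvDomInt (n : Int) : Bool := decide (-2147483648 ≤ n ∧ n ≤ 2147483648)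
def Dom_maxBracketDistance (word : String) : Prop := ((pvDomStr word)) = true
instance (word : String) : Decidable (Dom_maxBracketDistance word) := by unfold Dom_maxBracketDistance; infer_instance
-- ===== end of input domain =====

-- B replaces A's two running 'seen'-character counters (per-iteration increment, reset-on-empty
-- and minus-one bookkeeping, final max of two per-type maxima) by stacks of opening-bracket
-- INDICES and one best-accumulator fed with i - j - 1 when a pop empties its stack;
-- objective: simpler.

-- word[-1] == '$' / word[:-1] prologue, shared verbatim by both ports (and used by Pre_ to
-- describe the effective word).
def pvStrip (word : String) : List Char :=
  if PySem.List.pyGet? word.toList (-1) = some '$' then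
    PySem.List.slice word.toList none (some (-1))
  else word.toList

-- ===== PORT A =====
-- A's per-stack distance update: 'if not stack: (flush max, reset) else: distance += 1'.
def tickA (stack : List Char) (d m : Int) : Int × Int :=
  if stack = [] then (0, if m < d then d - 1 else m) else (d + 1, m)

-- one iteration of A's loop body; state = (distance_square, max_distance_square,
-- distance_curly, max_distance_curly, square_stack, curly_stack)
def stepA : (Int × Int × Int × Int × List Char × List Char) → Char →
    (Int × Int × Int × Int × List Char × List Char)
  | (ds, mds, dc, mdc, ss, cs), c =>
    let p : List Char × List Char :=
      if c = '[' then (ss ++ ['['], cs)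
      else if c = '{' then (ss, cs ++ ['{'])
      else if c = ']' then (ss.dropLast, cs)   -- .pop() on []: outside Pre_ (IndexError)
      else (ss, cs.dropLast)
    let q := tickA p.1 ds mds
    let r := tickA p.2 dc mdc
    (q.1, q.2, r.1, r.2, p.1, p.2)

def maxBracketDistance (word : String) : Int :=
  let ra := (pvStrip word).foldl stepA (0, 0, 0, 0, ([] : List Char), ([] : List Char))
  max ra.2.1 ra.2.2.2.1

-- ===== PORT B =====
-- one iteration of B's loop body; state = (i, best, square_stack, curly_stack); the leading Int
-- is the enumerate counter
def stepB : (Int × Int × List Int × List Int) → Char → (Int × Int × List Int × List Int)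
  | (i, best, sq, cu), c =>
    if c = '[' then (i + 1, best, i :: sq, cu)
    else if c = '{' then (i + 1, best, sq, i :: cu)
    else if c = ']' then
      match sq with
      | j :: rest => (i + 1, if rest = [] then max best (i - j - 1) else best, rest, cu)
      | [] => (i + 1, best, [], cu)            -- .pop() on []: outside Pre_ (IndexError)
    else
      match cu with
      | j :: rest => (i + 1, if rest = [] then max best (i - j - 1) else best, sq, rest)
      | [] => (i + 1, best, sq, [])            -- .pop() on []: outside Pre_ (IndexError)

def maxBracketDistance_alt (word : String) : Int :=
  ((pvStrip word).foldl stepB (0, 0, ([] : List Int), ([] : List Int))).2.1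

-- ===== PRECONDITION & SPEC =====
-- square-bracket balance contribution of one character ('[' opens, ']' closes)
def sdelta (c : Char) : Int := if c = '[' then 1 else if c = ']' then -1 else 0
-- curly balance contribution: '{' opens, any character other than '[', ']', '{' closes
def cdelta (c : Char) : Int := if c = '{' then 1 else if c = '[' ∨ c = ']' then 0 else -1
def balS (l : List Char) : Int := (l.map sdelta).sum
def balC (l : List Char) : Int := (l.map cdelta).sum

-- Pre_ excludes exactly the inputs on which A raises IndexError: the empty word (word[-1]),
-- and words where a ']' arrives with no open '[', or any other non-'['/'{' character arrives
-- with no open '{' (.pop() on an empty stack) — i.e. some prefix balance goes negative.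
def Pre_maxBracketDistance (word : String) : Prop :=
  word.toList ≠ [] ∧
  (∀ n ≤ (pvStrip word).length,
      0 ≤ balS ((pvStrip word).take n) ∧ 0 ≤ balC ((pvStrip word).take n))

instance (word : String) : Decidable (Pre_maxBracketDistance word) := by
  unfold Pre_maxBracketDistance; infer_instance

def pvWitness_maxBracketDistance : String := "[{[]}]$"

def Spec_maxBracketDistance (word : String) (out : Int) : Prop := out = maxBracketDistance_alt word
instance (word : String) (out : Int) : Decidable (Spec_maxBracketDistance word out) := by
  unfold Spec_maxBracketDistance; infer_instance

-- ===== CLAIM (what is proved, stated in full; the proofs are below) =====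
def Claim_equal_maxBracketDistance : Prop := ∀ (word : String), Dom_maxBracketDistance word → Pre_maxBracketDistance word → Spec_maxBracketDistance word (maxBracketDistance word)

-- ===== LEMMAS AND PROOFS =====

lemma getLastD_irrel {l : List Int} (h : l ≠ []) (a b : Int) : l.getLastD a = l.getLastD b := by
  cases l with
  | nil => exact absurd rfl h
  | cons x xs => rw [List.getLastD_cons, List.getLastD_cons]

-- 'processing the suffix l starting from the given stack sizes never pops an empty stack'
def Ok (l : List Char) (s c : Int) : Prop :=
  ∀ n : Nat, 0 ≤ s + balS (l.take n) ∧ 0 ≤ c + balC (l.take n)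

lemma balS_cons (a : Char) (l : List Char) : balS (a :: l) = sdelta a + balS l := by
  simp [balS]

lemma balC_cons (a : Char) (l : List Char) : balC (a :: l) = cdelta a + balC l := by
  simp [balC]

lemma ok_cons {a : Char} {l : List Char} {s c : Int} (h : Ok (a :: l) s c) :
    (0 ≤ s + sdelta a ∧ 0 ≤ c + cdelta a) ∧ Ok l (s + sdelta a) (c + cdelta a) := by
  have h1 := h 1
  simp [balS, balC] at h1
  refine ⟨⟨by omega, by omega⟩, ?_⟩
  intro n
  have := h (n + 1)
  simp only [List.take_succ_cons, balS_cons, balC_cons] at this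
  constructor <;> omega

-- the coupled invariant between A's state and B's state after processing k characters:
-- the stacks have equal heights, A's running counter is the distance to the bottom of B's
-- index stack, and B's best is the max of A's two per-type maxima.
def InvAB (k ds mds dc mdc best : Int) (ss cs : List Char) (sq cu : List Int) : Prop :=
  ss.length = sq.length ∧ cs.length = cu.length ∧
  (sq = [] → ds = 0) ∧ (sq ≠ [] → ds = k - sq.getLastD 0) ∧
  (cu = [] → dc = 0) ∧ (cu ≠ [] → dc = k - cu.getLastD 0) ∧
  best = max mds mdc ∧ 0 ≤ mds ∧ 0 ≤ mdc

lemma tickA_nil (d m : Int) : tickA [] d m = (0, if m < d then d - 1 else m) := rfl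

lemma tickA_ne {st : List Char} (h : st ≠ []) (d m : Int) : tickA st d m = (d + 1, m) := by
  simp [tickA, h]

-- the 'inactive' side of A's per-character distance update, expressed through B's stack
lemma tickA_passive {st : List Char} {bl : List Int} {d m : Int} (hlen : st.length = bl.length)
    (h0 : bl = [] → d = 0) (hm : 0 ≤ m) :
    tickA st d m = ((if bl = [] then 0 else d + 1), m) := by
  by_cases hb : bl = []
  · have hst : st = [] := by
      have : st.length = 0 := by rw [hlen, hb]; rfl
      exact List.length_eq_zero_iff.mp this
    rw [hst, tickA_nil, h0 hb, if_pos hb, if_neg (by omega)]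
  · have hst : st ≠ [] := by
      intro h; apply hb
      exact List.length_eq_zero_iff.mp (by rw [← hlen, h]; rfl)
    rw [tickA_ne hst, if_neg hb]

lemma stepA_push_sq (ds mds dc mdc : Int) (ss cs : List Char) :
    stepA (ds, mds, dc, mdc, ss, cs) '[' =
      ((tickA (ss ++ ['[']) ds mds).1, (tickA (ss ++ ['[']) ds mds).2,
       (tickA cs dc mdc).1, (tickA cs dc mdc).2, ss ++ ['['], cs) := rfl

lemma stepA_push_cu (ds mds dc mdc : Int) (ss cs : List Char) :
    stepA (ds, mds, dc, mdc, ss, cs) '{' =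
      ((tickA ss ds mds).1, (tickA ss ds mds).2,
       (tickA (cs ++ ['{']) dc mdc).1, (tickA (cs ++ ['{']) dc mdc).2, ss, cs ++ ['{']) := rfl

lemma stepA_pop_sq (ds mds dc mdc : Int) (ss cs : List Char) :
    stepA (ds, mds, dc, mdc, ss, cs) ']' =
      ((tickA ss.dropLast ds mds).1, (tickA ss.dropLast ds mds).2,
       (tickA cs dc mdc).1, (tickA cs dc mdc).2, ss.dropLast, cs) := rfl

lemma stepA_pop_cu {c : Char} (h1 : c ≠ '[') (h2 : c ≠ '{') (h3 : c ≠ ']')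
    (ds mds dc mdc : Int) (ss cs : List Char) :
    stepA (ds, mds, dc, mdc, ss, cs) c =
      ((tickA ss ds mds).1, (tickA ss ds mds).2,
       (tickA cs.dropLast dc mdc).1, (tickA cs.dropLast dc mdc).2, ss, cs.dropLast) := by
  simp [stepA, h1, h2, h3]

lemma stepB_push_sq (i best : Int) (sq cu : List Int) :
    stepB (i, best, sq, cu) '[' = (i + 1, best, i :: sq, cu) := rfl

lemma stepB_push_cu (i best : Int) (sq cu : List Int) :
    stepB (i, best, sq, cu) '{' = (i + 1, best, sq, i :: cu) := rfl

lemma stepB_pop_sq (i best j : Int) (rest cu : List Int) :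
    stepB (i, best, j :: rest, cu) ']' =
      (i + 1, if rest = [] then max best (i - j - 1) else best, rest, cu) := rfl

lemma stepB_pop_cu {c : Char} (h1 : c ≠ '[') (h2 : c ≠ '{') (h3 : c ≠ ']')
    (i best j : Int) (sq rest : List Int) :
    stepB (i, best, sq, j :: rest) c =
      (i + 1, if rest = [] then max best (i - j - 1) else best, sq, rest) := by
  simp [stepB, h1, h2, h3]

-- A's flush 'if distance > max: max = distance - 1' is a running maximum
lemma flush_eq_max {d m : Int} : (if m < d then d - 1 else m) = max m (d - 1) := by
  split_ifs with h
  · rw [max_eq_right (by omega)]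
  · rw [max_eq_left (by omega)]

lemma key : ∀ (l : List Char) (k ds mds dc mdc best : Int) (ss cs : List Char)
    (sq cu : List Int),
    InvAB k ds mds dc mdc best ss cs sq cu →
    Ok l (sq.length : Int) (cu.length : Int) →
    max (l.foldl stepA (ds, mds, dc, mdc, ss, cs)).2.1
        (l.foldl stepA (ds, mds, dc, mdc, ss, cs)).2.2.2.1
      = (l.foldl stepB (k, best, sq, cu)).2.1 := by
  intro l
  induction l with
  | nil =>
    intro k ds mds dc mdc best ss cs sq cu hInv _
    obtain ⟨-, -, -, -, -, -, hbest, -, -⟩ := hInv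
    simp only [List.foldl_nil]
    exact hbest.symm
  | cons a l ih =>
    intro k ds mds dc mdc best ss cs sq cu hInv hOk
    obtain ⟨⟨hs1, hc1⟩, hOk'⟩ := ok_cons hOk
    obtain ⟨hls, hlc, hds0, hdsn, hdc0, hdcn, hbest, hm1, hm2⟩ := hInv
    simp only [List.foldl_cons]
    by_cases ha1 : a = '['
    · -- push square
      subst ha1
      rw [stepA_push_sq, stepB_push_sq, tickA_ne (by simp : ss ++ ['['] ≠ []),
        tickA_passive hlc hdc0 hm2]
      dsimp only
      have hgl : (k :: sq).getLastD 0 = if sq = [] then k else sq.getLastD 0 := by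
        rw [List.getLastD_cons]
        by_cases hsq : sq = []
        · subst hsq; simp
        · rw [if_neg hsq]; exact getLastD_irrel hsq k 0
      apply ih
      · refine ⟨by simp [hls], hlc, by simp, ?_, fun h => if_pos h, ?_, hbest, hm1, hm2⟩
        · intro _
          rw [hgl]
          by_cases hsq : sq = []
          · rw [if_pos hsq]; have := hds0 hsq; omega
          · rw [if_neg hsq]; have := hdsn hsq; omega
        · intro hcu; rw [if_neg hcu]; have := hdcn hcu; omega
      · have e1 : (((k :: sq).length : Nat) : Int) = (sq.length : Int) + sdelta '[' := by
          simp [sdelta]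
        have e2 : (cu.length : Int) = (cu.length : Int) + cdelta '[' := by simp [cdelta]
        rw [e1, e2]; exact hOk'
    · by_cases ha2 : a = '{'
      · -- push curly
        subst ha2
        rw [stepA_push_cu, stepB_push_cu, tickA_ne (by simp : cs ++ ['{'] ≠ []),
          tickA_passive hls hds0 hm1]
        dsimp only
        have hgl : (k :: cu).getLastD 0 = if cu = [] then k else cu.getLastD 0 := by
          rw [List.getLastD_cons]
          by_cases hcu : cu = []
          · subst hcu; simp
          · rw [if_neg hcu]; exact getLastD_irrel hcu k 0
        apply ih
        · refine ⟨hls, by simp [hlc], fun h => if_pos h, ?_, by simp, ?_, hbest, hm1, hm2⟩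
          · intro hsq; rw [if_neg hsq]; have := hdsn hsq; omega
          · intro _
            rw [hgl]
            by_cases hcu : cu = []
            · rw [if_pos hcu]; have := hdc0 hcu; omega
            · rw [if_neg hcu]; have := hdcn hcu; omega
        · have e1 : (sq.length : Int) = (sq.length : Int) + sdelta '{' := by simp [sdelta]
          have e2 : (((k :: cu).length : Nat) : Int) = (cu.length : Int) + cdelta '{' := by
            simp [cdelta]
          rw [e1, e2]; exact hOk'
      · by_cases ha3 : a = ']'
        · -- pop square
          subst ha3
          have hsd : sdelta ']' = -1 := by decide
          rw [hsd] at hs1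
          have hsqne : sq ≠ [] := by
            intro h; subst h; simp at hs1
          obtain ⟨j, rest, rfl⟩ := List.exists_cons_of_ne_nil hsqne
          have hlss : ss.length = rest.length + 1 := by rw [hls]; rfl
          have hds : ds = k - (j :: rest).getLastD 0 := hdsn (by simp)
          rw [stepA_pop_sq, stepB_pop_sq, tickA_passive hlc hdc0 hm2]
          have hOkn : Ok l ((rest.length : Nat) : Int) ((cu.length : Nat) : Int) := by
            have e1 : ((rest.length : Nat) : Int) = ((j :: rest).length : Int) + sdelta ']' := by
              rw [hsd]; simp
            have e2 : (cu.length : Int) = (cu.length : Int) + cdelta ']' := by simp [cdelta]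
            rw [e1, e2]; exact hOk'
          by_cases hrest : rest = []
          · subst hrest
            have hgj : (j :: ([] : List Int)).getLastD 0 = j := by simp
            rw [hgj] at hds
            have hdl : ss.dropLast = [] := by
              apply List.length_eq_zero_iff.mp
              rw [List.length_dropLast, hlss]
              simp
            rw [hdl, tickA_nil, if_pos rfl]
            dsimp only
            apply ih
            · refine ⟨by simp, hlc, fun _ => rfl, by simp, fun h => if_pos h, ?_, ?_,
                by split_ifs <;> omega, hm2⟩
              · intro hcu; rw [if_neg hcu]; have := hdcn hcu; omega
              · rw [flush_eq_max, hbest, max_right_comm]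
                have : ds - 1 = k - j - 1 := by omega
                rw [this]
            · exact hOkn
          · have hg : (j :: rest).getLastD 0 = rest.getLastD 0 := by
              rw [List.getLastD_cons]; exact getLastD_irrel hrest j 0
            have hdlne : ss.dropLast ≠ [] := by
              intro h
              have h2 : ss.dropLast.length = ss.length - 1 := List.length_dropLast
              rw [h, hlss] at h2
              simp at h2
              exact hrest (List.length_eq_zero_iff.mp (by omega))
            rw [tickA_ne hdlne, if_neg hrest]
            dsimp only
            apply ih
            · refine ⟨by rw [List.length_dropLast, hlss]; simp, hlc,
                fun h => absurd h hrest, ?_, fun h => if_pos h, ?_, hbest, hm1, hm2⟩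
              · intro _; rw [← hg]; omega
              · intro hcu; rw [if_neg hcu]; have := hdcn hcu; omega
            · exact hOkn
        · -- pop curly (any character other than '[', '{', ']')
          have hcd : cdelta a = -1 := by simp [cdelta, ha1, ha2, ha3]
          have hsd : sdelta a = 0 := by simp [sdelta, ha1, ha3]
          rw [hcd] at hc1
          have hcune : cu ≠ [] := by
            intro h; subst h; simp at hc1
          obtain ⟨j, rest, rfl⟩ := List.exists_cons_of_ne_nil hcune
          have hlcs : cs.length = rest.length + 1 := by rw [hlc]; rfl
          have hdc : dc = k - (j :: rest).getLastD 0 := hdcn (by simp)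
          rw [stepA_pop_cu ha1 ha2 ha3, stepB_pop_cu ha1 ha2 ha3,
            tickA_passive hls hds0 hm1]
          have hOkn : Ok l ((sq.length : Nat) : Int) ((rest.length : Nat) : Int) := by
            have e1 : (sq.length : Int) = (sq.length : Int) + sdelta a := by rw [hsd]; simp
            have e2 : ((rest.length : Nat) : Int) = ((j :: rest).length : Int) + cdelta a := by
              rw [hcd]; simp
            rw [e1, e2]; exact hOk'
          by_cases hrest : rest = []
          · subst hrest
            have hgj : (j :: ([] : List Int)).getLastD 0 = j := by simp
            rw [hgj] at hdc
            have hdl : cs.dropLast = [] := by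
              apply List.length_eq_zero_iff.mp
              rw [List.length_dropLast, hlcs]
              simp
            rw [hdl, tickA_nil, if_pos rfl]
            dsimp only
            apply ih
            · refine ⟨hls, by simp, fun h => if_pos h, ?_, fun _ => rfl, by simp, ?_, hm1,
                by split_ifs <;> omega⟩
              · intro hsq; rw [if_neg hsq]; have := hdsn hsq; omega
              · rw [flush_eq_max, hbest, max_assoc]
                have : dc - 1 = k - j - 1 := by omega
                rw [this]
            · exact hOkn
          · have hg : (j :: rest).getLastD 0 = rest.getLastD 0 := by
              rw [List.getLastD_cons]; exact getLastD_irrel hrest j 0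
            have hdlne : cs.dropLast ≠ [] := by
              intro h
              have h2 : cs.dropLast.length = cs.length - 1 := List.length_dropLast
              rw [h, hlcs] at h2
              simp at h2
              exact hrest (List.length_eq_zero_iff.mp (by omega))
            rw [tickA_ne hdlne, if_neg hrest]
            dsimp only
            apply ih
            · refine ⟨hls, by rw [List.length_dropLast, hlcs]; simp, fun h => if_pos h, ?_,
                fun h => absurd h hrest, ?_, hbest, hm1, hm2⟩
              · intro hsq; rw [if_neg hsq]; have := hdsn hsq; omega
              · intro _; rw [← hg]; omega
            · exact hOkn

-- ===== VERDICT (by name: the statement is the Claim_ definition above) =====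
theorem maxBracketDistance_spec : Claim_equal_maxBracketDistance := by
  intro word _ hpre
  obtain ⟨-, hball⟩ := hpre
  show maxBracketDistance word = maxBracketDistance_alt word
  simp only [maxBracketDistance, maxBracketDistance_alt]
  apply key
  · exact ⟨rfl, rfl, fun _ => rfl, fun h => absurd rfl h, fun _ => rfl,
      fun h => absurd rfl h, by simp, le_refl 0, le_refl 0⟩
  · intro n
    by_cases hn : n ≤ (pvStrip word).length
    · have := hball n hn
      simpa using this
    · rw [List.take_of_length_le (by omega)]
      have := hball (pvStrip word).length le_rfl
      rw [List.take_length] at this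
      simpa using this
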